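-- pv_equiv track=rewrite | github.com/ASSERT-KTH/Mokav | experiments/pynguin/c4b/return-lst/generated_tests/src_490/6/src_490.py | func
-- ===== SOURCE A (Python) =====
-- def func(*args):
-- 	ret_values = []
--
-- 	hello = 'hello'
-- 	s = args[0]
-- 	count = 0
-- 	for c in s:
-- 	    if (count == 5):
-- 	        break
-- 	    elif (c == hello[count]):
-- 	        count += 1
-- 	ret_values.append(('YES' if (count == 5) else 'NO'))
--
-- 	return ret_values
-- ===== SOURCE B (Python) =====
-- def func(*args):
--     s = args[0]
--     hello = 'hello'
--     # bit-parallel (shift-and) subsequence recognizer: bit i of `state` set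
--     # iff hello[:i] is a subsequence of the scanned prefix of s
--     masks = {}
--     for i in range(len(hello)):
--         c = hello[i]
--         masks[c] = masks.get(c, 0) | (1 << i)
--     state = 1
--     for c in s:
--         state = state | ((state << 1) & (masks.get(c, 0) << 1))
--     return ['YES' if (state >> len(hello)) & 1 else 'NO']
-- ===== Notes on version B (the rewrite author's own statement) =====
-- stated objective: alternative
-- what changed: B replaces A's greedy counter scan with a bit-parallel (shift-and) subsequence automaton: per-character bitmasks of the five-letter target word are precomputed and a state bitset of matched prefixes is advanced with shift/and/or operations over s.
import Mathlib
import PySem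

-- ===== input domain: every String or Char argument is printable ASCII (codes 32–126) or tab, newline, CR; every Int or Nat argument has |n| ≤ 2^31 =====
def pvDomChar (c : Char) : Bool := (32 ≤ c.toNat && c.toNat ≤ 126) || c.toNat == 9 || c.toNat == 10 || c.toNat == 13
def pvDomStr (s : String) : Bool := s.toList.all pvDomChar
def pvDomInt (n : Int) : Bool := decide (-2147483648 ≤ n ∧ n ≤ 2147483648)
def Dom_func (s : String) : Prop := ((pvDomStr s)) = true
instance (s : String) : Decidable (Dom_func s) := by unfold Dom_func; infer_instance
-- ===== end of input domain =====

-- B replaces A's greedy counter scan with a bit-parallel (shift-and) subsequence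
-- automaton over precomputed per-character bitmasks (objective: alternative).

-- ===== PORT A =====
-- the for-loop of A: scan the string, advancing `count` into 'hello', breaking at 5
def funcLoop : List Char → Nat → Nat
  | [], count => count
  | c :: cs, count =>
      if count = 5 then count
      else if c = (['h','e','l','l','o'].getD count ' ') then funcLoop cs (count + 1)
      else funcLoop cs count

def func (s : String) : List String :=
  [if funcLoop s.toList 0 = 5 then "YES" else "NO"]

-- ===== PORT B =====
-- masks = {}; for i in range(len(hello)): masks[hello[i]] = masks.get(hello[i], 0) | (1 << i)
-- (the shift amount i is 0..4 and nonnegative, so `.toNat` on the enumerate index is exact)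
def buildMasks : PySem.Dict Char Nat :=
  (PySem.List.enumerate ['h','e','l','l','o']).foldl
    (fun d p => d.insert p.2 ((d.getD p.2 0) ||| (1 <<< p.1.toNat))) (PySem.Dict.mk [])

-- state = state | ((state << 1) & (masks.get(c, 0) << 1))
def stepB (masks : PySem.Dict Char Nat) (state : Nat) (c : Char) : Nat :=
  state ||| ((state <<< 1) &&& ((masks.getD c 0) <<< 1))

def func_alt (s : String) : List String :=
  let masks := buildMasks
  let state := s.toList.foldl (stepB masks) 1
  [if (state >>> 5) &&& 1 ≠ 0 then "YES" else "NO"]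

-- ===== PRECONDITION & SPEC =====
def Spec_func (s : String) (out : List String) : Prop := out = func_alt s
instance (s : String) (out : List String) : Decidable (Spec_func s out) := by unfold Spec_func; infer_instance

-- ===== CLAIM (what is proved, stated in full; the proofs are below) =====
def Claim_equal_func : Prop := ∀ (s : String), Dom_func s → Spec_func s (func s)

-- ===== LEMMAS AND PROOFS =====

lemma buildMasks_eq : buildMasks = PySem.Dict.mk [('h',1),('e',2),('l',12),('o',16)] := by rfl

lemma masks_getD (c : Char) : buildMasks.getD c 0 =
    if c = 'h' then 1 else if c = 'e' then 2 else if c = 'l' then 12 else if c = 'o' then 16 else 0 := by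
  rw [buildMasks_eq]
  simp only [PySem.Dict.getD_eq_get?_getD, PySem.Dict.get?_mk_cons]
  rcases eq_or_ne c 'h' with h1|h1
  · subst h1; simp
  rcases eq_or_ne c 'e' with h2|h2
  · subst h2; simp
  rcases eq_or_ne c 'l' with h3|h3
  · subst h3; simp
  rcases eq_or_ne c 'o' with h4|h4
  · subst h4; simp
  simp [if_neg (Ne.symm h1), if_neg (Ne.symm h2), if_neg (Ne.symm h3), if_neg (Ne.symm h4),
    h1, h2, h3, h4, PySem.Dict.get?]

-- one step of B on the invariant state 2^(k+1)-1 mirrors one step of A's counter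
lemma stepB_spec (c : Char) (k : Nat) (hk : k ≤ 5) :
    stepB buildMasks (2 ^ (k + 1) - 1) c =
      2 ^ ((if k = 5 then k
            else if c = (['h','e','l','l','o'].getD k ' ') then k + 1 else k) + 1) - 1 := by
  unfold stepB
  rw [masks_getD c]
  rcases eq_or_ne c 'h' with h1|h1
  · subst h1; interval_cases k <;> decide
  rcases eq_or_ne c 'e' with h2|h2
  · subst h2; interval_cases k <;> decide
  rcases eq_or_ne c 'l' with h3|h3
  · subst h3; interval_cases k <;> decide
  rcases eq_or_ne c 'o' with h4|h4
  · subst h4; interval_cases k <;> decide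
  interval_cases k <;> simp [h1, h2, h3, h4]

lemma funcLoop_five (cs : List Char) : funcLoop cs 5 = 5 := by
  cases cs <;> simp [funcLoop]

-- invariant: B's state bitset is exactly the set of bits 0..count reached by A's counter
lemma fold_stepB_eq (cs : List Char) (k : Nat) (hk : k ≤ 5) :
    cs.foldl (stepB buildMasks) (2 ^ (k + 1) - 1) = 2 ^ (funcLoop cs k + 1) - 1 := by
  induction cs generalizing k with
  | nil => simp [funcLoop]
  | cons c cs ih =>
      have hcount : funcLoop (c :: cs) k =
          funcLoop cs (if k = 5 then k
                       else if c = (['h','e','l','l','o'].getD k ' ') then k + 1 else k) := by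
        by_cases h5 : k = 5
        · subst h5
          simp [funcLoop, funcLoop_five]
        · simp only [funcLoop, if_neg h5]
          split <;> rfl
      rw [List.foldl_cons, stepB_spec c k hk, hcount]
      split_ifs with h5 hc
      · exact ih k hk
      · exact ih (k + 1) (by omega)
      · exact ih k hk

lemma funcLoop_le (cs : List Char) (k : Nat) (hk : k ≤ 5) : funcLoop cs k ≤ 5 := by
  induction cs generalizing k with
  | nil => simpa [funcLoop]
  | cons c cs ih =>
      simp only [funcLoop]
      split_ifs with h5 hc
      · omega
      · exact ih (k + 1) (by omega)
      · exact ih k hk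

-- ===== VERDICT (by name: the statement is the Claim_ definition above) =====
theorem func_spec : Claim_equal_func := by
  intro s _
  unfold Spec_func func func_alt
  have h0 := fold_stepB_eq s.toList 0 (by omega)
  norm_num at h0
  simp only [h0]
  have hle : funcLoop s.toList 0 ≤ 5 := funcLoop_le s.toList 0 (by omega)
  set n := funcLoop s.toList 0 with hn
  interval_cases n <;> simp
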